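-- pv_equiv track=rewrite | github.com/NabuCasa/silabs-firmware-builder | tools/create_gbl.py | parse_properties_file
-- ===== SOURCE A (Python) =====
-- def parse_properties_file(file_content: str) -> dict[str, str | list[str]]:
--     """
--     Parses custom .properties file format into a dictionary.
--     Handles double backslashes as escape characters for spaces.
--     """
--     properties = {}
--
--     for line in file_content.split("\n"):
--         line = line.strip()
--
--         if not line or line.startswith("#"):
--             continue
--
--         key, value = line.split("=", 1)
--         key = key.strip()
--
--         properties[key] = []
--         current_value = ""
--         i = 0
--
--         while i < len(value):
--             if value[i : i + 2] == "\\\\":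
--                 current_value += " "
--                 i += 2
--             elif value[i] == " ":
--                 properties[key].append(current_value)
--                 current_value = ""
--                 i += 1
--             else:
--                 current_value += value[i]
--                 i += 1
--
--         if current_value:
--             properties[key].append(current_value)
--
--     return properties
-- ===== SOURCE B (Python) =====
-- def parse_properties_file(file_content: str) -> dict[str, str | list[str]]:
--     """
--     Parses custom .properties file format into a dictionary.
--     Splits each value on spaces and un-escapes double backslashes per token.
--     """
--     properties = {}
--     for line in file_content.split("\n"):
--         line = line.strip()
--         if not line or line.startswith("#"):
--             continue
--         key, value = line.split("=", 1)
--         tokens = value.split(" ")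
--         if tokens and tokens[-1] == "":
--             tokens = tokens[:-1]
--         properties[key.strip()] = [t.replace("\\\\", " ") for t in tokens]
--     return properties
-- ===== Notes on version B (the rewrite author's own statement) =====
-- stated objective: simpler
-- what changed: B replaces A's index-based character-by-character state machine over the value (tracking current_value and an escape lookahead) by a single value.split(" ") followed by a per-token "\\\\"->" " replacement, dropping the one trailing empty token.
import Mathlib
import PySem

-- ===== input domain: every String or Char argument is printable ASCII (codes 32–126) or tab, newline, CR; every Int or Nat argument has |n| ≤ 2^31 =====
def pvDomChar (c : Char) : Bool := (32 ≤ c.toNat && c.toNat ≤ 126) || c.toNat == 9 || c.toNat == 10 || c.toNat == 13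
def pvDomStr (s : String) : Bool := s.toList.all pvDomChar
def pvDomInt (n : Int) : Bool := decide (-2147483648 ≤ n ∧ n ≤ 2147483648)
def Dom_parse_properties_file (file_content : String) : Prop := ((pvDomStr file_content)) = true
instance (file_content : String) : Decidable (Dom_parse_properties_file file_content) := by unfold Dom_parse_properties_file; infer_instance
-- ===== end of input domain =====

-- B replaces A's character-by-character escape/separator state machine by split-on-space
-- then per-token un-escaping ("\\\\" -> " "), dropping the single trailing empty token; same result, simpler.

-- ===== PORT A =====

-- shared by both ports (both Pythons do `file_content.split("\n")`; separator "\n" ≠ "", so split? is `some`)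
def pvLines (s : String) : List String := (PySem.Str.split? s "\n").getD []

-- A's `while i < len(value)` loop: `value[i:i+2] == "\\\\"` is "the next two chars are backslashes";
-- cur is `current_value`, acc is `properties[key]` being appended to; the trailing
-- `if current_value: properties[key].append(current_value)` is the [] case.
def pvA_value : List Char → List Char → List (List Char) → List (List Char)
  | '\\' :: '\\' :: rest, cur, acc => pvA_value rest (cur ++ [' ']) acc
  | ' ' :: rest, cur, acc => pvA_value rest [] (acc ++ [cur])
  | c :: rest, cur, acc => pvA_value rest (cur ++ [c]) acc
  | [], cur, acc => if cur ≠ [] then acc ++ [cur] else acc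

def pvA_line (d : PySem.Dict String (List String)) (line : String) : PySem.Dict String (List String) :=
  let line := PySem.Str.strip line
  if line = "" ∨ PySem.Str.startswith line "#" then d
  else
    match PySem.Str.splitMax? line "=" 1 with
    | some [key, value] =>
        let key := PySem.Str.strip key
        -- Python sets properties[key] = [] and appends into it; acc collects those appends,
        -- written once (Dict.insert overwrites in place, so the position is the same)
        d.insert key ((pvA_value value.toList [] []).map String.ofList)
    | _ => d  -- unreachable under Pre_: the line has no "=", Python raises ValueError here

def parse_properties_file (file_content : String) : List (String × List String) :=
  ((pvLines file_content).foldl pvA_line PySem.Dict.empty).items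

-- ===== PORT B =====

def pvB_line (d : PySem.Dict String (List String)) (line : String) : PySem.Dict String (List String) :=
  let line := PySem.Str.strip line
  if line = "" ∨ PySem.Str.startswith line "#" then d
  else
    match PySem.Str.splitMax? line "=" 1 with
    | some [key, value] =>
        -- value.split(" "): separator " " ≠ "", exact as Chars.splitOn
        let tokens := PySem.Chars.splitOn value.toList [' ']
        -- Source B: `if tokens and tokens[-1] == "": tokens = tokens[:-1]` (split never yields [])
        let tokens := if tokens.getLast? = some ([] : List Char) then tokens.dropLast else tokens
        -- [t.replace("\\\\", " ") for t in tokens]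
        d.insert (PySem.Str.strip key)
          (tokens.map (fun t => String.ofList (PySem.Chars.replace t ['\\', '\\'] [' '])))
    | _ => d  -- unreachable under Pre_: the line has no "=", Python raises ValueError here

def parse_properties_file_alt (file_content : String) : List (String × List String) :=
  ((pvLines file_content).foldl pvB_line PySem.Dict.empty).items

-- ===== PRECONDITION & SPEC =====
-- Pre_ excludes exactly the inputs where a non-empty, non-comment line has no "=":
-- there Python's `key, value = line.split("=", 1)` raises ValueError (in both A and B).
def Pre_parse_properties_file (file_content : String) : Prop :=
  ∀ line ∈ pvLines file_content,
    ¬(PySem.Str.strip line = "" ∨ PySem.Str.startswith (PySem.Str.strip line) "#") →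
      '=' ∈ (PySem.Str.strip line).toList
instance (file_content : String) : Decidable (Pre_parse_properties_file file_content) := by
  unfold Pre_parse_properties_file; infer_instance

def pvWitness_parse_properties_file : String := "a = b\\\\c d \n# note\n\nk=1 2 "

def Spec_parse_properties_file (file_content : String) (out : List (String × List String)) : Prop := out = parse_properties_file_alt file_content
instance (file_content : String) (out : List (String × List String)) : Decidable (Spec_parse_properties_file file_content out) := by unfold Spec_parse_properties_file; infer_instance

-- ===== CLAIM (what is proved, stated in full; the proofs are below) =====
def Claim_equal_parse_properties_file : Prop := ∀ (file_content : String), Dom_parse_properties_file file_content → Pre_parse_properties_file file_content → Spec_parse_properties_file file_content (parse_properties_file file_content)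

-- ===== LEMMAS AND PROOFS =====

-- reference split-on-one-space (what Chars.splitOn · [' '] computes)
def pvSpSplit : List Char → List (List Char)
  | [] => [[]]
  | c :: t =>
      if c = ' ' then [] :: pvSpSplit t
      else match pvSpSplit t with
           | h :: r => (c :: h) :: r
           | [] => [[c]]

-- reference "\\\\" → " " replacement (what Chars.replace · ['\\','\\'] [' '] computes)
def pvBsRepl : List Char → List Char
  | '\\' :: '\\' :: t => ' ' :: pvBsRepl t
  | c :: t => c :: pvBsRepl t
  | [] => []

def pvConsFst (p : List Char) : List (List Char) → List (List Char)
  | h :: r => (p ++ h) :: r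
  | [] => [p]

def pvFin (ls : List (List Char)) : List (List Char) :=
  if ls.getLast? = some ([] : List Char) then ls.dropLast else ls

theorem pvSpSplit_dest (cs : List Char) : ∃ h r, pvSpSplit cs = h :: r := by
  cases cs with
  | nil => exact ⟨[], [], rfl⟩
  | cons c t =>
    simp only [pvSpSplit]
    split
    · exact ⟨_, _, rfl⟩
    · split <;> exact ⟨_, _, rfl⟩

theorem pvBsRepl_bs (t : List Char) : pvBsRepl ('\\' :: '\\' :: t) = ' ' :: pvBsRepl t := rfl

theorem pvBsRepl_cons (c : Char) (t : List Char)
    (h : c ≠ '\\' ∨ ∀ t', t ≠ '\\' :: t') : pvBsRepl (c :: t) = c :: pvBsRepl t := by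
  rw [pvBsRepl.eq_def]
  split
  · rename_i t' heq
    injection heq with h1 h2
    rcases h with h | h
    · exact absurd h1 h
    · exact absurd h2 (h t')
  · rename_i c' t' heq
    injection heq with h1 h2
    rw [h1, h2]
  · rename_i heq; simp at heq

theorem pvBsRepl_eq_nil_iff (t : List Char) : pvBsRepl t = [] ↔ t = [] := by
  constructor
  · intro h
    cases t with
    | nil => rfl
    | cons c t =>
      exfalso
      rw [pvBsRepl.eq_def] at h
      revert h
      split <;> simp_all
  · intro h; rw [h]; rfl

theorem pvFin_cons (a : List Char) (l : List (List Char)) (h : l ≠ []) :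
    pvFin (a :: l) = a :: pvFin l := by
  obtain ⟨b, l', rfl⟩ : ∃ b l', l = b :: l' := by
    cases l with
    | nil => exact absurd rfl h
    | cons b l' => exact ⟨b, l', rfl⟩
  unfold pvFin
  rw [List.getLast?_cons_cons, List.dropLast_cons₂]
  split <;> rfl

theorem pv_splitOn_go (fuel : Nat) (l cur : List Char) (acc : List (List Char))
    (hf : l.length < fuel) :
    PySem.Chars.splitOn.go [' '] fuel l cur acc = acc.reverse ++ pvConsFst cur.reverse (pvSpSplit l) := by
  induction fuel generalizing l cur acc with
  | zero => omega
  | succ fuel ih =>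
    cases l with
    | nil => simp [PySem.Chars.splitOn.go, pvSpSplit, pvConsFst]
    | cons c rest =>
      simp only [PySem.Chars.splitOn.go]
      by_cases hc : c = ' '
      · subst hc
        have hpre : [' '].isPrefixOf (' ' :: rest) = true := by simp [List.isPrefixOf]
        rw [if_pos hpre]
        have hdrop : List.drop [' '].length (' ' :: rest) = rest := rfl
        rw [hdrop, ih rest [] (cur.reverse :: acc) (by simp at hf ⊢; omega)]
        obtain ⟨h, r, hhr⟩ := pvSpSplit_dest rest
        simp [pvSpSplit, pvConsFst, hhr]
      · have hpre : [' '].isPrefixOf (c :: rest) = false := by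
          simp only [List.isPrefixOf, Bool.and_eq_false_iff]
          left
          simp only [beq_eq_false_iff_ne, ne_eq]
          exact fun hh => hc hh.symm
        rw [if_neg (by simp [hpre])]
        rw [ih rest (c :: cur) acc (by simp at hf ⊢; omega)]
        obtain ⟨h, r, hhr⟩ := pvSpSplit_dest rest
        simp [pvSpSplit, pvConsFst, hhr, hc]

theorem pv_splitOn_space (vs : List Char) :
    PySem.Chars.splitOn vs [' '] = pvSpSplit vs := by
  unfold PySem.Chars.splitOn
  rw [pv_splitOn_go (vs.length + 1) vs [] [] (by omega)]
  obtain ⟨h, r, hhr⟩ := pvSpSplit_dest vs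
  simp [pvConsFst, hhr]

theorem pv_replace_go (fuel : Nat) (l acc : List Char) (hf : l.length ≤ fuel) :
    PySem.Chars.replace.go ['\\', '\\'] [' '] fuel l acc = acc.reverse ++ pvBsRepl l := by
  induction fuel generalizing l acc with
  | zero =>
    have : l = [] := List.length_eq_zero_iff.mp (Nat.le_zero.mp hf)
    subst this
    simp [PySem.Chars.replace.go, pvBsRepl]
  | succ fuel ih =>
    cases l with
    | nil => simp [PySem.Chars.replace.go, pvBsRepl]
    | cons c t =>
      simp only [PySem.Chars.replace.go]
      by_cases hpre : ['\\', '\\'].isPrefixOf (c :: t) = true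
      · obtain ⟨hc, t', ht⟩ : c = '\\' ∧ ∃ t', t = '\\' :: t' := by
          cases t with
          | nil => simp [List.isPrefixOf] at hpre
          | cons d t' =>
            simp only [List.isPrefixOf, Bool.and_eq_true, beq_iff_eq] at hpre
            exact ⟨hpre.1.symm, t', by rw [← hpre.2.1]⟩
        subst hc; subst ht
        rw [if_pos hpre]
        have hdrop : List.drop (['\\', '\\'] : List Char).length ('\\' :: '\\' :: t') = t' := rfl
        rw [hdrop, ih t' ([' '].reverse ++ acc) (by simp at hf ⊢; omega)]
        simp [pvBsRepl_bs]
      · rw [if_neg hpre]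
        rw [ih t (c :: acc) (by simp at hf ⊢; omega)]
        rw [pvBsRepl_cons c t ?_]
        · simp
        · by_cases hc : c = '\\'
          · right
            intro t' ht'
            subst hc; subst ht'
            exact hpre (by simp [List.isPrefixOf])
          · exact Or.inl hc

theorem pv_replace_bs (t : List Char) :
    PySem.Chars.replace t ['\\', '\\'] [' '] = pvBsRepl t := by
  unfold PySem.Chars.replace
  rw [if_neg (by simp)]
  rw [pv_replace_go t.length t [] (le_refl _)]
  simp

-- head of pvSpSplit never starts with a char the source does not start with
theorem pvSpSplit_head_no_bs (rest : List Char) (h : List Char) (r : List (List Char))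
    (hne : ∀ t', rest ≠ '\\' :: t') (hhr : pvSpSplit rest = h :: r) :
    ∀ t', h ≠ '\\' :: t' := by
  intro t' ht'
  cases rest with
  | nil =>
    simp [pvSpSplit] at hhr
    rw [hhr.1] at ht'; exact absurd ht' (by simp)
  | cons d rest' =>
    by_cases hd2 : d = ' '
    · subst hd2
      simp [pvSpSplit] at hhr
      rw [hhr.1] at ht'; exact absurd ht' (by simp)
    · obtain ⟨h2, r2, hhr2⟩ := pvSpSplit_dest rest'
      have heq : pvSpSplit (d :: rest') = (d :: h2) :: r2 := by simp [pvSpSplit, hd2, hhr2]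
      rw [heq] at hhr
      have h1 : d :: h2 = h := ((List.cons.injEq _ _ _ _).mp hhr).1
      rw [← h1] at ht'
      have hdh : d = '\\' := ((List.cons.injEq _ _ _ _).mp ht').1
      exact hne rest' (by rw [hdh])

-- the main invariant of A's state machine against split-then-unescape
theorem pvA_value_eq_aux (cs cur : List Char) (acc : List (List Char)) :
    pvA_value cs cur acc = acc ++ pvFin (pvConsFst cur ((pvSpSplit cs).map pvBsRepl)) := by
  fun_induction pvA_value cs cur acc with
  | case1 rest cur acc ih =>
    rw [ih]
    obtain ⟨h, r, hhr⟩ := pvSpSplit_dest rest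
    have h1 : pvSpSplit ('\\' :: '\\' :: rest) = ('\\' :: '\\' :: h) :: r := by
      simp [pvSpSplit, hhr]
    rw [h1, hhr]
    simp only [List.map_cons, pvBsRepl_bs, pvConsFst]
    simp [List.append_assoc]
  | case2 rest cur acc ih =>
    rw [ih]
    obtain ⟨h, r, hhr⟩ := pvSpSplit_dest rest
    have h1 : pvSpSplit (' ' :: rest) = [] :: pvSpSplit rest := by simp [pvSpSplit]
    rw [h1, hhr]
    simp only [List.map_cons, pvConsFst, List.nil_append, List.append_nil,
      show pvBsRepl [] = ([] : List Char) from rfl]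
    rw [pvFin_cons cur _ (by simp)]
    simp
  | case3 c rest cur acc hne1 hne2 ih =>
    have hc : c ≠ ' ' := fun h => hne2 h
    rw [ih]
    obtain ⟨h, r, hhr⟩ := pvSpSplit_dest rest
    have h1 : pvSpSplit (c :: rest) = (c :: h) :: r := by
      simp [pvSpSplit, hc, hhr]
    have h2 : pvBsRepl (c :: h) = c :: pvBsRepl h := by
      apply pvBsRepl_cons
      by_cases hcb : c = '\\'
      · subst hcb
        right
        exact pvSpSplit_head_no_bs rest h r (fun t' ht' => hne1 t' rfl ht') hhr
      · exact Or.inl hcb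
    rw [h1, hhr]
    simp only [List.map_cons, h2, pvConsFst]
    simp [List.append_assoc]
  | case4 cur acc hcur =>
    simp only [pvSpSplit, List.map_cons, List.map_nil, pvConsFst,
      show pvBsRepl [] = ([] : List Char) from rfl, List.append_nil]
    unfold pvFin
    simp [hcur]
  | case5 cur acc hcur =>
    have hc : cur = [] := not_not.mp hcur
    subst hc
    simp [pvSpSplit, pvConsFst, pvFin, show pvBsRepl [] = ([] : List Char) from rfl]

theorem pv_value_eq (vs : List Char) :
    (pvA_value vs [] []).map String.ofList =
      ((if (PySem.Chars.splitOn vs [' ']).getLast? = some ([] : List Char)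
        then (PySem.Chars.splitOn vs [' ']).dropLast
        else PySem.Chars.splitOn vs [' ']).map
        (fun t => String.ofList (PySem.Chars.replace t ['\\', '\\'] [' ']))) := by
  rw [pvA_value_eq_aux vs [] []]
  rw [pv_splitOn_space]
  obtain ⟨h, r, hhr⟩ := pvSpSplit_dest vs
  have hid : pvConsFst [] ((pvSpSplit vs).map pvBsRepl) = (pvSpSplit vs).map pvBsRepl := by
    rw [hhr]; simp [pvConsFst]
  rw [hid]
  have hfin : pvFin ((pvSpSplit vs).map pvBsRepl) =
      ((if (pvSpSplit vs).getLast? = some ([] : List Char)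
        then (pvSpSplit vs).dropLast else pvSpSplit vs).map pvBsRepl) := by
    unfold pvFin
    rw [List.getLast?_map]
    by_cases hl : (pvSpSplit vs).getLast? = some ([] : List Char)
    · rw [hl]
      simp only [Option.map_some, show pvBsRepl [] = ([] : List Char) from rfl,
        if_true, List.map_dropLast]
    · rw [if_neg hl, if_neg ?_]
      intro hcon
      cases hlast : (pvSpSplit vs).getLast? with
      | none => rw [hlast] at hcon; simp at hcon
      | some t =>
        rw [hlast] at hcon
        simp only [Option.map_some, Option.some.injEq] at hcon
        exact hl (hlast.trans (by rw [(pvBsRepl_eq_nil_iff t).mp hcon]))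
  rw [hfin]
  simp only [List.nil_append, List.map_map]
  apply List.map_congr_left
  intro t _
  simp [pv_replace_bs]

theorem pv_line_eq (d : PySem.Dict String (List String)) (line : String) :
    pvA_line d line = pvB_line d line := by
  unfold pvA_line pvB_line
  dsimp only
  split_ifs with hskip
  · rfl
  · cases hsp : PySem.Str.splitMax? (PySem.Str.strip line) "=" 1 with
    | none => rfl
    | some parts =>
      match parts with
      | [] => rfl
      | [k] => rfl
      | [k, v] => dsimp only; rw [pv_value_eq]
      | k :: v :: w :: rest => rfl

-- ===== VERDICT (by name: the statement is the Claim_ definition above) =====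
theorem parse_properties_file_spec : Claim_equal_parse_properties_file := by
  intro file_content _ _
  unfold Spec_parse_properties_file parse_properties_file parse_properties_file_alt
  have hfun : pvA_line = pvB_line := funext fun d => funext fun line => pv_line_eq d line
  rw [hfun]
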